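-- pv_equiv track=rewrite | github.com/SaarShai/Primes-Equispaced | experiments/compute_U_block_v2.py | E_r_alt
-- ===== SOURCE A (Python) =====
-- def E_r_alt(r, n):
--     if n <= 0:
--         return 0
--     total = 0
--     hi = n // 2
--     for v in range(1, hi + 1):
--         rv_mod_n = (r * v) % n
--         total += rv_mod_n - v
--     return total
-- ===== SOURCE B (Python) =====
-- def floor_sum(n, m, a, b):
--     # sum of (a*i + b) // m for i in range(n); requires n, a, b >= 0 and m > 0
--     ans = 0
--     while True:
--         if a >= m:
--             ans += (n - 1) * n // 2 * (a // m)
--             a %= m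
--         if b >= m:
--             ans += n * (b // m)
--             b %= m
--         y = a * n + b
--         if y < m:
--             return ans
--         n, b, m, a = y // m, y % m, a, m
--
--
-- def E_r_alt(r, n):
--     if n <= 0:
--         return 0
--     hi = n // 2
--     a = r % n
--     s = hi * (hi + 1) // 2
--     return a * s - n * floor_sum(hi + 1, n, a, 0) - s
-- ===== Notes on version B (the rewrite author's own statement) =====
-- stated objective: faster
-- what changed: Replaces the O(n) loop summing (r*v % n) - v for v=1..n//2 by a closed form: r%n * S - n * floor_sum(hi+1, n, r%n, 0) - S with S = hi*(hi+1)//2, where floor_sum is the O(log n) Euclidean (floor-sum) recurrence.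
import Mathlib
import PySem

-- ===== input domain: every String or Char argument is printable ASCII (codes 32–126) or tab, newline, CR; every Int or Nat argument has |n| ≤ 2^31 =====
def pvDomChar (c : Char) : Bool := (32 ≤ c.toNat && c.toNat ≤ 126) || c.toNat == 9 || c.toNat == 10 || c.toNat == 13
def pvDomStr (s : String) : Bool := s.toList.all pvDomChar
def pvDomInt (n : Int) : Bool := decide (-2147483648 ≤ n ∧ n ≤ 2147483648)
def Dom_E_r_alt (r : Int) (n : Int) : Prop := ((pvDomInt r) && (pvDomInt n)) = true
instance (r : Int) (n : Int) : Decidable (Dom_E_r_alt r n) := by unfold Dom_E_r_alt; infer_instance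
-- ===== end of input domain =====

-- B replaces A's O(n) loop over v=1..n//2 by the O(log n) Euclidean floor-sum recurrence
-- (objective: faster, asymptotic).

-- ===== PORT A =====
def E_r_alt (r : Int) (n : Int) : Int :=
  if n ≤ 0 then 0
  else
    let hi := PySem.Int.floordiv n 2
    (PySem.List.pyRange 1 (hi + 1) 1).foldl
      (fun total v => total + (PySem.Int.mod (r * v) n - v)) 0

-- ===== PORT B =====
-- Source B's floor_sum: its arguments are always nonnegative ints with m > 0 (it is called with
-- m = n > 0, a = r % n ≥ 0, b = 0), so it is ported over Nat, where Python's // and % on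
-- nonnegative ints are exactly Nat division and mod. The `m = 0` guard only makes the
-- recursion total (Python would raise ZeroDivisionError there; E_r_alt_alt never calls it so).
def floorSum (n m a b : Nat) : Nat :=
  if _hm : m = 0 then 0
  else
    let ans1 := (n - 1) * n / 2 * (a / m)
    let a1 := a % m
    let ans2 := n * (b / m)
    let b1 := b % m
    let y := a1 * n + b1
    if y < m then ans1 + ans2
    else ans1 + ans2 + floorSum (y / m) a1 m (y % m)
  termination_by m
  decreasing_by exact Nat.mod_lt _ (Nat.pos_of_ne_zero _hm)

-- literal transliteration of Source B's E_r_alt; the floorSum arguments hi+1, n, r % n are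
-- nonnegative (n > 0 on this branch), so .toNat is exact.
def E_r_alt_alt (r : Int) (n : Int) : Int :=
  if n ≤ 0 then 0
  else
    let hi := PySem.Int.floordiv n 2
    let a := PySem.Int.mod r n
    let s := PySem.Int.floordiv (hi * (hi + 1)) 2
    a * s - n * (floorSum (hi + 1).toNat n.toNat a.toNat 0 : Int) - s

-- ===== PRECONDITION & SPEC =====
def Spec_E_r_alt (r : Int) (n : Int) (out : Int) : Prop := out = E_r_alt_alt r n
instance (r : Int) (n : Int) (out : Int) : Decidable (Spec_E_r_alt r n out) := by unfold Spec_E_r_alt; infer_instance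

-- ===== CLAIM (what is proved, stated in full; the proofs are below) =====
def Claim_equal_E_r_alt : Prop := ∀ (r : Int) (n : Int), Dom_E_r_alt r n → Spec_E_r_alt r n (E_r_alt r n)

-- ===== LEMMAS AND PROOFS =====

-- x/d as a count of multiples of d below x (used to turn both floor sums into lattice-point counts)
theorem div_eq_sum_ind (x d K : Nat) (hd : 0 < d) (hK : x / d ≤ K) :
    x / d = ∑ j ∈ Finset.range K, (if d * (j + 1) ≤ x then 1 else 0) := by
  rw [← Finset.card_filter]
  have : (Finset.range K).filter (fun j => d * (j + 1) ≤ x) = Finset.range (x / d) := by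
    ext j
    simp only [Finset.mem_filter, Finset.mem_range]
    have hcomm : d * (j + 1) = (j + 1) * d := Nat.mul_comm _ _
    constructor
    · rintro ⟨-, h⟩
      have : j + 1 ≤ x / d := (Nat.le_div_iff_mul_le hd).2 (by omega)
      omega
    · intro h
      have : (j + 1) * d ≤ x := (Nat.le_div_iff_mul_le hd).1 (by omega)
      exact ⟨by omega, by omega⟩
  rw [this, Finset.card_range]

-- the Euclidean swap: with 0 < a, b < m, y = a*n + b and m ≤ y,
-- ∑_{i<n} (a i + b)/m = ∑_{j<y/m} (m j + y%m)/a  (count the same lattice points by rows/columns)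
theorem floor_swap (n m a b : Nat) (hm : 0 < m) (ha : 0 < a) (hb : b < m)
    (hy : m ≤ a * n + b) :
    ∑ i ∈ Finset.range n, (a * i + b) / m
      = ∑ j ∈ Finset.range ((a * n + b) / m), (m * j + (a * n + b) % m) / a := by
  set Y := (a * n + b) / m with hY
  set c := (a * n + b) % m with hc
  have hrel : m * Y + c = a * n + b := Nat.div_add_mod _ _
  have hYpos : 0 < Y := (Nat.le_div_iff_mul_le hm).2 (by omega)
  have hcm : c < m := Nat.mod_lt _ hm
  -- each left term's floor is ≤ Y, each right term's floor is ≤ n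
  have hL : ∀ i, i < n → (a * i + b) / m ≤ Y := by
    intro i hi
    exact Nat.div_le_div_right (by nlinarith)
  have hR : ∀ j, j < Y → (m * j + c) / a ≤ n := by
    intro j hj
    have h1 : m * (j + 1) ≤ m * Y := Nat.mul_le_mul_left m hj
    have h2 : m * j + c ≤ a * n := by nlinarith
    calc (m * j + c) / a ≤ (a * n) / a := Nat.div_le_div_right h2
      _ = n := Nat.mul_div_cancel_left n ha
  calc
    ∑ i ∈ Finset.range n, (a * i + b) / m
        = ∑ i ∈ Finset.range n, ∑ j ∈ Finset.range Y,
            (if m * (j + 1) ≤ a * i + b then 1 else 0) := by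
          refine Finset.sum_congr rfl (fun i hi => ?_)
          exact div_eq_sum_ind _ _ _ hm (hL i (Finset.mem_range.1 hi))
    _ = ∑ i ∈ Finset.range n, ∑ j ∈ Finset.range Y,
            (if a * ((n - 1 - i) + 1) ≤ m * (Y - 1 - j) + c then 1 else 0) := by
          refine Finset.sum_congr rfl (fun i hi => Finset.sum_congr rfl (fun j hj => ?_))
          have hi' := Finset.mem_range.1 hi
          have hj' := Finset.mem_range.1 hj
          have e1 : (n - 1 - i) + 1 = n - i := by omega
          have e2 : Y - 1 - j = Y - (j + 1) := by omega
          rw [e1, e2]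
          have hin : i ≤ n := le_of_lt hi'
          have hjY : j + 1 ≤ Y := hj'
          have hrelZ : (m : ℤ) * Y + c = a * n + b := by exact_mod_cast hrel
          have key : (m * (j + 1) ≤ a * i + b) ↔ (a * (n - i) ≤ m * (Y - (j + 1)) + c) := by
            zify [hin, hjY]
            constructor <;> intro h <;> nlinarith [hrelZ]
          exact if_congr key rfl rfl
    _ = ∑ i ∈ Finset.range n, ∑ j ∈ Finset.range Y,
            (if a * (i + 1) ≤ m * (Y - 1 - j) + c then 1 else 0) := by
          exact Finset.sum_range_reflect
            (fun i => ∑ j ∈ Finset.range Y,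
              (if a * (i + 1) ≤ m * (Y - 1 - j) + c then 1 else 0)) n
    _ = ∑ i ∈ Finset.range n, ∑ j ∈ Finset.range Y,
            (if a * (i + 1) ≤ m * j + c then 1 else 0) := by
          refine Finset.sum_congr rfl (fun i _ => ?_)
          exact Finset.sum_range_reflect (fun j => if a * (i + 1) ≤ m * j + c then 1 else 0) Y
    _ = ∑ j ∈ Finset.range Y, ∑ i ∈ Finset.range n,
            (if a * (i + 1) ≤ m * j + c then 1 else 0) := Finset.sum_comm
    _ = ∑ j ∈ Finset.range Y, (m * j + c) / a := by
          refine Finset.sum_congr rfl (fun j hj => ?_)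
          exact (div_eq_sum_ind _ _ _ ha (hR j (Finset.mem_range.1 hj))).symm

-- peel off the whole parts of a and b from each floor term
theorem sum_div_reduce (n m a b : Nat) (hm : 0 < m) :
    ∑ i ∈ Finset.range n, (a * i + b) / m
      = (n - 1) * n / 2 * (a / m) + n * (b / m)
        + ∑ i ∈ Finset.range n, ((a % m) * i + b % m) / m := by
  have hterm : ∀ i, (a * i + b) / m = (a / m * i + b / m) + ((a % m) * i + b % m) / m := by
    intro i
    have key : a * i + b = m * (a / m * i + b / m) + ((a % m) * i + b % m) := by
      calc a * i + b = (m * (a / m) + a % m) * i + (m * (b / m) + b % m) := by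
            rw [Nat.div_add_mod, Nat.div_add_mod]
        _ = m * (a / m * i + b / m) + ((a % m) * i + b % m) := by ring
    rw [key, Nat.mul_add_div hm]
  rw [Finset.sum_congr rfl (fun i _ => hterm i)]
  rw [Finset.sum_add_distrib, Finset.sum_add_distrib, ← Finset.mul_sum]
  have hgauss : ∑ i ∈ Finset.range n, i = (n - 1) * n / 2 := by
    have := Finset.sum_range_id_mul_two n
    have e : n * (n - 1) = (n - 1) * n := Nat.mul_comm _ _
    omega
  rw [hgauss, Finset.sum_const, Finset.card_range, smul_eq_mul]
  ring

-- correctness of the Euclidean recurrence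
theorem floorSum_eq (m : Nat) : ∀ (n a b : Nat), 0 < m →
    floorSum n m a b = ∑ i ∈ Finset.range n, (a * i + b) / m := by
  induction m using Nat.strong_induction_on with
  | _ m IH =>
    intro n a b hm
    have hne : m ≠ 0 := by omega
    rw [floorSum, dif_neg hne]
    simp only []
    rw [sum_div_reduce n m a b hm]
    by_cases hy : (a % m) * n + b % m < m
    · rw [if_pos hy]
      have hz : ∑ i ∈ Finset.range n, ((a % m) * i + b % m) / m = 0 := by
        refine Finset.sum_eq_zero (fun i hi => ?_)
        have hi' := Finset.mem_range.1 hi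
        have hmono : (a % m) * i ≤ (a % m) * n := Nat.mul_le_mul_left _ (le_of_lt hi')
        exact Nat.div_eq_of_lt (by omega)
      omega
    · rw [if_neg hy]
      rw [Nat.not_lt] at hy
      have hb1 : b % m < m := Nat.mod_lt _ hm
      have ha1 : 0 < a % m := by
        rcases Nat.eq_zero_or_pos (a % m) with h0 | h
        · rw [h0] at hy; omega
        · exact h
      have hlt : a % m < m := Nat.mod_lt _ hm
      rw [IH (a % m) hlt _ m _ ha1]
      rw [floor_swap n m (a % m) (b % m) hm ha1 hb1 hy]

theorem E_r_alt_spec : Claim_equal_E_r_alt := by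
  unfold Claim_equal_E_r_alt Spec_E_r_alt
  intro r n _
  by_cases hn : n ≤ 0
  · simp [E_r_alt, E_r_alt_alt, hn]
  · rw [Int.not_le] at hn
    rw [E_r_alt, E_r_alt_alt, if_neg (by omega), if_neg (by omega)]
    simp only []
    set H : Int := PySem.Int.floordiv n 2 with hH
    have hH0 : 0 ≤ H := by
      rw [hH, PySem.Int.floordiv_eq_ediv_of_pos (by omega)]
      positivity
    set a : Int := PySem.Int.mod r n with ha
    have haemod : a = r % n := by rw [ha, PySem.Int.mod_eq_emod_of_pos hn]
    have ha0 : 0 ≤ a := by rw [haemod]; exact Int.emod_nonneg r (by omega)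
    have han : a < n := by rw [haemod]; exact Int.emod_lt_of_pos r hn
    set Hn : Nat := H.toNat with hHn
    set N : Nat := n.toNat with hN
    set A : Nat := a.toNat with hA
    have hHc : (Hn : Int) = H := Int.toNat_of_nonneg hH0
    have hNc : (N : Int) = n := Int.toNat_of_nonneg (by omega)
    have hAc : (A : Int) = a := Int.toNat_of_nonneg ha0
    have hNpos : 0 < N := by omega
    -- A's loop is a sum over range
    rw [PySem.List.foldl_add, PySem.List.pyRange_one]
    have e1 : (H + 1 - 1 : Int) = H := by ring
    rw [e1, List.map_map, zero_add]
    have listsum : ((List.range Hn).map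
        (fun (k : Nat) => PySem.Int.mod (r * (1 + (k : Int))) n - (1 + (k : Int)))).sum
        = ∑ k ∈ Finset.range Hn, (PySem.Int.mod (r * (1 + (k : Int))) n - (1 + (k : Int))) := rfl
    rw [show ((fun v => PySem.Int.mod (r * v) n - v) ∘ fun (k : Nat) => (1 : Int) + (k : Int))
        = fun (k : Nat) => PySem.Int.mod (r * (1 + (k : Int))) n - (1 + (k : Int)) from rfl]
    rw [listsum]
    have hs : PySem.Int.floordiv (H * (H + 1)) 2 = ((Hn * (Hn + 1) / 2 : Nat) : Int) := by
      rw [PySem.Int.floordiv_eq_ediv_of_pos (by omega : (0:Int) < 2), ← hHc, Int.natCast_ediv]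
      push_cast
      ring_nf
    have hHn1 : (H + 1).toNat = Hn + 1 := by omega
    rw [hHn1, floorSum_eq N (Hn + 1) A 0 hNpos]
    have hshift : ∑ i ∈ Finset.range (Hn + 1), (A * i + 0) / N
        = ∑ k ∈ Finset.range Hn, A * (k + 1) / N := by
      rw [Finset.sum_range_succ']
      simp
    rw [hshift]
    have hgauss : ∀ M : Nat, ∑ k ∈ Finset.range M, (k + 1) = M * (M + 1) / 2 := by
      intro M
      induction M with
      | zero => simp
      | succ m ih =>
        rw [Finset.sum_range_succ, ih]
        obtain ⟨t, ht⟩ : 2 ∣ m * (m + 1) := even_iff_two_dvd.mp (Nat.even_mul_succ_self m)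
        have e3 : (m + 1) * (m + 1 + 1) = 2 * t + 2 * (m + 1) := by
          rw [show (m + 1) * (m + 1 + 1) = m * (m + 1) + 2 * (m + 1) from by ring, ht]
        omega
    have hterm : ∀ k ∈ Finset.range Hn,
        PySem.Int.mod (r * (1 + (k : Int))) n - (1 + (k : Int))
          = (A : Int) * ((k : Int) + 1) - n * ((A * (k + 1) / N : Nat) : Int) - ((k : Int) + 1) := by
      intro k _
      rw [PySem.Int.mod_eq_emod_of_pos hn]
      have h1 : (r * (1 + (k : Int))) % n = (a * (1 + (k : Int))) % n := by
        conv_lhs => rw [Int.mul_emod]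
        conv_rhs => rw [Int.mul_emod]
        rw [haemod, Int.emod_emod_of_dvd _ (dvd_refl n)]
      have h3 : (a * (1 + (k : Int))) / n = ((A * (k + 1) / N : Nat) : Int) := by
        rw [← hAc, ← hNc, show ((A : Int) * (1 + (k : Int))) = ((A * (k + 1) : Nat) : Int) by
          push_cast; ring, Int.natCast_ediv]
      rw [h1, Int.emod_def, h3, ← hAc]
      push_cast
      ring
    rw [Finset.sum_congr rfl hterm, hs]
    rw [Finset.sum_sub_distrib, Finset.sum_sub_distrib, ← Finset.mul_sum, ← Finset.mul_sum]
    rw [← Nat.cast_sum]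
    have hcastg : ∑ k ∈ Finset.range Hn, ((k : Int) + 1) = ((Hn * (Hn + 1) / 2 : Nat) : Int) := by
      rw [← hgauss Hn]
      push_cast
      ring
    rw [hcastg, hAc]
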